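-- pv_equiv track=rewrite | github.com/ShValerii/Logic-Game | Logic-Game.py | taskcode
-- ===== SOURCE A (Python) =====
-- def taskcode(numb) :
--     if numb==1 :
--         j,answ = 0,0
--         for i in range(1, 7):
--             j = 9 - i
--             if (2 * i) + (3 * j) == 23:
--                 answ=j
--         return answ
--     elif numb==2 :
--         j = 0
--         for i in range ( 1 , 11 ):
--             j = 19 - i
--             if i + 2 * j == 28:
--                 return j
--     elif numb==3 :
--         j = 0
--         for i in range ( 1 , int ( 68 / 6 ) + 1 ):
--             j = 10 - i
--             if 6 * i + 8 * j == 68: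
--                 return j
--     elif numb==4 :
--         b , c = 0 , 0
--         for a in range ( 1 , 16 ):
--             b = 1
--             c = a - b
--             if a + b + c == 16 and a - b == c:
--                 return a
--     elif numb==5 :
--         for kira in range ( 1 , int ( 81 / 4 ) ):
--             if kira + kira * 5 + kira * 5 * 5 + kira * 5 * 5 * 2 == 81:
--                 return kira * 5
-- ===== SOURCE B (Python) =====
-- def taskcode(numb):
--     # Each fixed puzzle is a linear equation; solve it in closed form instead of searching.
--     if numb == 1:
--         return 5   # 2i+3(9-i)=23 => i=4, j=5
--     elif numb == 2:
--         return 9   # i+2(19-i)=28 => i=10, j=9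
--     elif numb == 3:
--         return 4   # 6i+8(10-i)=68 => i=6, j=4
--     elif numb == 4:
--         return 8   # a+1+(a-1)=16 => a=8
--     elif numb == 5:
--         return 5   # kira*81=81 => kira=1, answer kira*5
-- ===== Notes on version B (the rewrite author's own statement) =====
-- stated objective: simpler
-- what changed: Each branch's search loop over a range is replaced by the constant obtained by solving the branch's linear equation algebraically; the if/elif dispatch and implicit None are kept.
import Mathlib
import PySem

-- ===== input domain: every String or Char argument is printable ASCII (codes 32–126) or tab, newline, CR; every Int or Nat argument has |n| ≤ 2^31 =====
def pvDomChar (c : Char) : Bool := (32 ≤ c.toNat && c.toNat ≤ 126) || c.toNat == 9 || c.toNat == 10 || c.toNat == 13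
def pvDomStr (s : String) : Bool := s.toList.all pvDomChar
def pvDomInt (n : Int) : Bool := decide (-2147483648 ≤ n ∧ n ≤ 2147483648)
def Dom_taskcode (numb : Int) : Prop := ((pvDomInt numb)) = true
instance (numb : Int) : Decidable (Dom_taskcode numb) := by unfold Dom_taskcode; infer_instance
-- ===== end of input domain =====

-- B replaces each branch's search loop with the algebraically solved constant (simpler; same if/elif dispatch and implicit None).


-- ===== PORT A =====
-- return-inside-loop ported as first-match recursion over the range list
def pvLoop2 : List Int → Option Int
  | [] => none
  | i :: rest => let j := 19 - i; if i + 2 * j = 28 then some j else pvLoop2 rest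

def pvLoop3 : List Int → Option Int
  | [] => none
  | i :: rest => let j := 10 - i; if 6 * i + 8 * j = 68 then some j else pvLoop3 rest

def pvLoop4 : List Int → Option Int
  | [] => none
  | a :: rest =>
    let b : Int := 1
    let c := a - b
    if a + b + c = 16 ∧ a - b = c then some a else pvLoop4 rest

def pvLoop5 : List Int → Option Int
  | [] => none
  | kira :: rest =>
    if kira + kira * 5 + kira * 5 * 5 + kira * 5 * 5 * 2 = 81 then some (kira * 5)
    else pvLoop5 rest

def taskcode (numb : Int) : Option Int :=
  if numb = 1 then
    -- for-loop with accumulator (j, answ); returns answ after the loop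
    let st := (PySem.List.pyRange 1 7 1).foldl
      (fun (s : Int × Int) i =>
        let j := 9 - i
        if 2 * i + 3 * j = 23 then (j, j) else (j, s.2)) (0, 0)
    some st.2
  else if numb = 2 then pvLoop2 (PySem.List.pyRange 1 11 1)
  else if numb = 3 then pvLoop3 (PySem.List.pyRange 1 12 1)   -- int(68/6)+1 = 12
  else if numb = 4 then pvLoop4 (PySem.List.pyRange 1 16 1)
  else if numb = 5 then pvLoop5 (PySem.List.pyRange 1 20 1)   -- int(81/4) = 20
  else none

-- ===== PORT B =====
def taskcode_alt (numb : Int) : Option Int :=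
  if numb = 1 then some 5
  else if numb = 2 then some 9
  else if numb = 3 then some 4
  else if numb = 4 then some 8
  else if numb = 5 then some 5
  else none

-- ===== PRECONDITION & SPEC =====
def Spec_taskcode (numb : Int) (out : Option Int) : Prop := out = taskcode_alt numb
instance (numb : Int) (out : Option Int) : Decidable (Spec_taskcode numb out) := by unfold Spec_taskcode; infer_instance

-- ===== CLAIM (what is proved, stated in full; the proofs are below) =====
def Claim_equal_taskcode : Prop := ∀ (numb : Int), Dom_taskcode numb → Spec_taskcode numb (taskcode numb)

-- ===== LEMMAS AND PROOFS =====

-- ===== VERDICT (by name: the statement is the Claim_ definition above) =====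
theorem taskcode_spec : Claim_equal_taskcode := by
  intro numb _
  unfold Spec_taskcode
  by_cases h1 : numb = 1
  · subst h1; decide
  by_cases h2 : numb = 2
  · subst h2; decide
  by_cases h3 : numb = 3
  · subst h3; decide
  by_cases h4 : numb = 4
  · subst h4; decide
  by_cases h5 : numb = 5
  · subst h5; decide
  simp [taskcode, taskcode_alt, h1, h2, h3, h4, h5]
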